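-- pv_equiv track=rewrite | github.com/Fondamenti18/fondamenti-di-programmazione | students/1762403/homework02/program03.py | doubleInString
-- ===== SOURCE A (Python) =====
-- def doubleInString(string):
--     double = dict()
--     for char in string:
--         if(string.count(char) > 1):
--             double[char] = set()
--             string2 = string
--             pointer = 0
--             index = 0
--             while pointer != -1:
--                 pointer = string2.find(char)
--                 index += pointer
--                 double[char].add(index)
--                 index += 1
--                 string2 = string[index:]
--
--     return double
-- ===== SOURCE B (Python) =====
-- def doubleInString(string):
--     table = {}
--     for i, ch in enumerate(string):
--         table.setdefault(ch, set()).add(i)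
--     return {ch: idxs for ch, idxs in table.items() if len(idxs) > 1}
-- ===== Notes on version B (the rewrite author's own statement) =====
-- stated objective: faster
-- what changed: A re-counts each character and rescans the whole string with repeated .find/slicing for every position; B does one enumerate pass building a char->index-set table, then filters entries with more than one index.
import Mathlib
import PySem

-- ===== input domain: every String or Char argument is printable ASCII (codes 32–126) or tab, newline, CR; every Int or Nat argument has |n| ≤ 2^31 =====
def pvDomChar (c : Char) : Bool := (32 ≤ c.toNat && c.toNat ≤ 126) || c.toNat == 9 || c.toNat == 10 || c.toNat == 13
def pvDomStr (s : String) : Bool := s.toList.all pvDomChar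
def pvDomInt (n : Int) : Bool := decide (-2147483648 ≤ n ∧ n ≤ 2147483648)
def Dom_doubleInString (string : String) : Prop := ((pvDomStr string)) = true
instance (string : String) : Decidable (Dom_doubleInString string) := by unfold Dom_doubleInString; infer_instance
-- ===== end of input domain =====

-- B replaces A's per-character count + repeated .find/slice rescans by a single
-- enumerate pass into a char → index-set table followed by a filter (faster).

-- ===== PORT A =====
-- A's inner `while pointer != -1` loop: state (acc = double[char], string2, index);
-- the body always runs at least once (pointer starts at 0). Fuel only makes the
-- recursion structural; len+1 is enough (the loop runs count(char)+1 times).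
def pvALoop (s : List Char) (char : Char) (acc : PySem.Set Int) (string2 : List Char)
    (index : Int) : Nat → PySem.Set Int
  | 0 => acc
  | fuel + 1 =>
    let pointer := PySem.Chars.find string2 [char]
    let index1 := index + pointer
    let acc1 := PySem.Set.add acc index1
    let index2 := index1 + 1
    let string2' := PySem.List.slice s (some index2) none
    if pointer = -1 then acc1 else pvALoop s char acc1 string2' index2 fuel

def doubleInString (string : String) : List (String × List Int) :=
  let s := string.toList
  (s.foldl
    (fun (double : PySem.Dict String (List Int)) char =>
      if PySem.Chars.count s [char] > 1 then
        double.insert (String.ofList [char])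
          (pvALoop s char PySem.Set.empty s 0 (s.length + 1))
      else double)
    PySem.Dict.empty).items

-- ===== PORT B =====
def doubleInString_alt (string : String) : List (String × List Int) :=
  let table := (PySem.List.enumerate string.toList 0).foldl
    (fun (t : PySem.Dict String (List Int)) p =>
      t.modify (String.ofList [p.2]) PySem.Set.empty (fun st => PySem.Set.add st p.1))
    PySem.Dict.empty
  (PySem.Dict.ofList (table.items.filter (fun p => p.2.length > 1))).items

-- ===== PRECONDITION & SPEC =====
def Spec_doubleInString (string : String) (out : List (String × List Int)) : Prop := out = doubleInString_alt string
instance (string : String) (out : List (String × List Int)) : Decidable (Spec_doubleInString string out) := by unfold Spec_doubleInString; infer_instance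

-- ===== CLAIM (what is proved, stated in full; the proofs are below) =====
def Claim_equal_doubleInString : Prop := ∀ (string : String), Dom_doubleInString string → Spec_doubleInString string (doubleInString string)

-- ===== LEMMAS AND PROOFS =====

def pvKey (c : Char) : String := String.ofList [c]

-- absolute indices (counting from i) of the occurrences of c in t
def pvIdxFrom (t : List Char) (c : Char) (i : Int) : List Int :=
  ((PySem.List.enumerate t i).filter (fun p => p.2 == c)).map (·.1)

lemma pvKey_inj {a b : Char} (h : pvKey a = pvKey b) : a = b := by
  have := congrArg String.toList h
  simpa [pvKey] using this

-- find.go on a single-character needle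
lemma pv_findgo_none (c : Char) : ∀ (l : List Char) (k : Nat), c ∉ l →
    PySem.Chars.find.go [c] l k = -1 := by
  intro l; induction l with
  | nil => intro k _; simp [PySem.Chars.find.go]
  | cons h t ih =>
    intro k hm
    have hne : ¬ (c == h) = true := by
      simp only [beq_iff_eq]; rintro rfl; exact hm List.mem_cons_self
    simp only [PySem.Chars.find.go, List.isPrefixOf, Bool.and_true, hne]
    exact ih (k+1) (fun hc => hm (List.mem_cons_of_mem _ hc))

lemma pv_findgo_split (c : Char) : ∀ (u : List Char) (w : List Char) (k : Nat), c ∉ u →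
    PySem.Chars.find.go [c] (u ++ c :: w) k = (k : Int) + u.length := by
  intro u; induction u with
  | nil => intro w k _; simp [PySem.Chars.find.go, List.isPrefixOf]
  | cons h t ih =>
    intro w k hm
    have hne : ¬ (c == h) = true := by
      simp only [beq_iff_eq]; rintro rfl; exact hm List.mem_cons_self
    simp only [List.cons_append, PySem.Chars.find.go, List.isPrefixOf, Bool.and_true, hne]
    rw [ih w (k+1) (fun hc => hm (List.mem_cons_of_mem _ hc))]
    simp only [List.length_cons]; push_cast; ring

lemma pv_countgo (c : Char) : ∀ (fuel : Nat) (l : List Char) (acc : Nat), l.length ≤ fuel →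
    PySem.Chars.count.go [c] fuel l acc = acc + l.count c := by
  intro fuel; induction fuel with
  | zero =>
    intro l acc h
    have : l = [] := List.eq_nil_of_length_eq_zero (by omega)
    subst this; simp [PySem.Chars.count.go]
  | succ f ih =>
    intro l acc h
    match l with
    | [] => simp [PySem.Chars.count.go]
    | x :: t =>
      by_cases hx : c = x
      · subst hx
        simp only [PySem.Chars.count.go, List.isPrefixOf, beq_self_eq_true, Bool.and_true, if_true]
        rw [show List.drop [c].length (c :: t) = t by simp]
        rw [ih t (acc+1) (by simpa using h)]
        simp; omega
      · have hne : ¬ (c == x) = true := by simp [hx]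
        simp only [PySem.Chars.count.go, List.isPrefixOf, Bool.and_true, hne]
        rw [ih t acc (by simpa using h)]
        simp [Ne.symm hx]

lemma pv_count_single (s : List Char) (c : Char) :
    PySem.Chars.count s [c] = s.count c := by
  simp [PySem.Chars.count, pv_countgo c s.length s 0 le_rfl]

lemma pv_mem_of_mem_enumerate {α : Type} {p : Int × α} {xs : List α} {i : Int}
    (h : p ∈ PySem.List.enumerate xs i) : p.2 ∈ xs := by
  rcases (PySem.List.mem_enumerate_iff xs i p).mp h with ⟨k, hk, rfl⟩
  simp

lemma pv_idxFrom_nil_of_not_mem {t : List Char} {c : Char} (i : Int) (h : c ∉ t) :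
    pvIdxFrom t c i = [] := by
  unfold pvIdxFrom
  rw [List.filter_eq_nil_iff.mpr, List.map_nil]
  intro p hp hpc
  exact h (by have := pv_mem_of_mem_enumerate hp; rwa [eq_of_beq hpc] at this)

lemma pv_idxFrom_split {u w : List Char} {c : Char} (i : Int) (hu : c ∉ u) :
    pvIdxFrom (u ++ c :: w) c i = (i + u.length) :: pvIdxFrom w c (i + u.length + 1) := by
  unfold pvIdxFrom
  rw [PySem.List.enumerate_append, PySem.List.enumerate_cons, List.filter_append]
  rw [List.filter_eq_nil_iff.mpr (by
    intro p hp hpc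
    exact hu (by have := pv_mem_of_mem_enumerate hp; rwa [eq_of_beq hpc] at this))]
  simp

lemma pv_first_split {c : Char} {l : List Char} (h : c ∈ l) :
    ∃ u w, l = u ++ c :: w ∧ c ∉ u := by
  induction l with
  | nil => cases h
  | cons x t ih =>
    by_cases hx : c = x
    · exact ⟨[], t, by simp [hx], by simp⟩
    · have hct : c ∈ t := by
        rcases List.mem_cons.mp h with h' | h'
        · exact absurd h' hx
        · exact h'
      rcases ih hct with ⟨u, w, rfl, hu⟩
      exact ⟨x :: u, w, by simp, by simp [hx, hu]⟩

-- the characterisation of A's inner while-loop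
lemma pvALoop_spec (s : List Char) (c : Char) : ∀ (fuel i : Nat) (acc : List Int),
    i ≤ s.length →
    (s.drop i).count c + 1 ≤ fuel →
    (c ∈ s.drop i ∨ ((i : Int) - 1) ∈ acc) →
    (∀ j ∈ acc, j < (i : Int)) →
    pvALoop s c acc (s.drop i) (i : Int) fuel = acc ++ pvIdxFrom (s.drop i) c (i : Int) := by
  intro fuel
  induction fuel with
  | zero => intro i acc _ h2 _ _; omega
  | succ f ih =>
    intro i acc h1 h2 h3 h4
    by_cases hc : c ∈ s.drop i
    · rcases pv_first_split hc with ⟨u, w, hd, hu⟩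
      have hfind : PySem.Chars.find (s.drop i) [c] = (u.length : Int) := by
        rw [hd]; simpa using pv_findgo_split c u w 0 hu
      have hsplit_s : s = (s.take i ++ u ++ [c]) ++ w := by
        conv_lhs => rw [← List.take_append_drop i s]
        rw [hd]; simp
      have hlen : ((s.take i ++ u ++ [c])).length = i + u.length + 1 := by
        simp [List.length_take, min_eq_left h1]; omega
      have hdropnext : s.drop (i + u.length + 1) = w := by
        conv_lhs => rw [hsplit_s]
        rw [← hlen, List.drop_left]
      have hnot : ((i : Int) + u.length) ∉ acc := by
        intro hmem; have := h4 _ hmem; omega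
      have htn : ((i : Int) + u.length + 1).toNat = i + u.length + 1 := by omega
      have hslice : PySem.List.slice s (some ((i : Int) + u.length + 1)) none
          = s.drop (i + u.length + 1) := by
        rw [PySem.List.slice_from _ (by omega), htn]
      have hlen2 : i + u.length + 1 ≤ s.length := by
        have := congrArg List.length hsplit_s
        simp at this; omega
      have hcount : w.count c + 1 ≤ f := by
        have : (s.drop i).count c = u.count c + 1 + w.count c := by
          rw [hd]; simp [List.count_append]; omega
        have hu0 : u.count c = 0 := List.count_eq_zero.mpr hu
        omega
      have hrec := ih (i + u.length + 1) (acc ++ [(i : Int) + u.length])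
        hlen2 (by rw [hdropnext]; exact hcount)
        (Or.inr (by push_cast; simp))
        (by intro j hj; rcases List.mem_append.mp hj with hj | hj
            · have := h4 _ hj; push_cast; omega
            · simp at hj; push_cast; omega)
      rw [hdropnext] at hrec
      show (if PySem.Chars.find (s.drop i) [c] = -1 then
              PySem.Set.add acc ((i : Int) + PySem.Chars.find (s.drop i) [c])
            else pvALoop s c (PySem.Set.add acc ((i : Int) + PySem.Chars.find (s.drop i) [c]))
              (PySem.List.slice s (some ((i : Int) + PySem.Chars.find (s.drop i) [c] + 1)) none)
              ((i : Int) + PySem.Chars.find (s.drop i) [c] + 1) f) = _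
      rw [hfind, if_neg (by omega), PySem.Set.add_of_not_mem hnot, hslice, hdropnext]
      have hcast : ((i : Int) + u.length + 1) = ((i + u.length + 1 : Nat) : Int) := by push_cast; ring
      rw [hcast, hrec]
      rw [hd, pv_idxFrom_split _ hu]
      push_cast; simp
    · have hifr : pvIdxFrom (s.drop i) c (i:Int) = [] := pv_idxFrom_nil_of_not_mem _ hc
      have hmem : ((i : Int) - 1) ∈ acc := h3.resolve_left hc
      have hfind : PySem.Chars.find (s.drop i) [c] = -1 := by
        simpa using pv_findgo_none c (s.drop i) 0 hc
      show (if PySem.Chars.find (s.drop i) [c] = -1 then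
              PySem.Set.add acc ((i : Int) + PySem.Chars.find (s.drop i) [c])
            else _) = _
      rw [hfind, if_pos rfl]
      rw [show (i : Int) + (-1) = (i : Int) - 1 by ring]
      rw [PySem.Set.add_of_mem hmem, hifr, List.append_nil]

lemma pvALoop_top (s : List Char) (c : Char) (h : 1 < s.count c) :
    pvALoop s c PySem.Set.empty s 0 (s.length + 1) = pvIdxFrom s c 0 := by
  have := pvALoop_spec s c (s.length + 1) 0 []
    (by omega) (by simpa using Nat.add_le_add_right List.count_le_length 1)
    (Or.inl (by simpa using List.count_pos_iff.mp (by omega)))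
    (by simp)
  simpa [PySem.Set.empty] using this

-- dedup commutes with filter
lemma pv_ofList_filter {α : Type} [BEq α] [LawfulBEq α] (p : α → Bool) (l : List α) :
    PySem.Set.ofList (l.filter p) = (PySem.Set.ofList l).filter p := by
  induction l using List.reverseRecOn with
  | nil => simp [PySem.Set.ofList]
  | append_singleton l x ih =>
    rw [List.filter_append, PySem.Set.ofList_append_singleton]
    by_cases hp : p x = true
    · rw [show List.filter p [x] = [x] from by simp [hp],
        PySem.Set.ofList_append_singleton, ih]
      rw [PySem.Set.add_eq_ite, PySem.Set.add_eq_ite]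
      by_cases hx : x ∈ PySem.Set.ofList l
      · rw [if_pos (by simp [PySem.Set.mem_ofList, List.mem_filter,
          (PySem.Set.mem_ofList l x).mp hx, hp]), if_pos hx]
      · rw [if_neg (by simp [PySem.Set.mem_ofList, List.mem_filter] at hx ⊢; tauto),
          if_neg hx, List.filter_append]
        simp [hp]
    · rw [show List.filter p [x] = [] from by simp [hp], List.append_nil, ih,
        PySem.Set.add_eq_ite]
      by_cases hx : x ∈ PySem.Set.ofList l
      · rw [if_pos hx]
      · rw [if_neg hx, List.filter_append]
        simp [hp]

-- dedup commutes with an injective map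
lemma pv_ofList_map {α β : Type} [BEq α] [LawfulBEq α] [BEq β] [LawfulBEq β]
    (f : α → β) (hf : ∀ a b, f a = f b → a = b) (l : List α) :
    PySem.Set.ofList (l.map f) = (PySem.Set.ofList l).map f := by
  induction l using List.reverseRecOn with
  | nil => simp [PySem.Set.ofList]
  | append_singleton l x ih =>
    rw [List.map_append, List.map_singleton, PySem.Set.ofList_append_singleton,
      PySem.Set.ofList_append_singleton, ih, PySem.Set.add_eq_ite, PySem.Set.add_eq_ite]
    by_cases hx : x ∈ PySem.Set.ofList l
    · rw [if_pos (List.mem_map_of_mem hx), if_pos hx]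
    · have hnm : f x ∉ List.map f (PySem.Set.ofList l) := by
        intro hm
        rcases List.mem_map.mp hm with ⟨a, ha, hfa⟩
        exact hx (hf a x hfa ▸ ha)
      rw [if_neg hnm, if_neg hx, List.map_append, List.map_singleton]

-- A's outer fold: values depend only on the character, so overwrites are no-ops
lemma pv_foldA (v : Char → List Int) : ∀ (t : List Char),
    (t.foldl (fun (d : PySem.Dict String (List Int)) c => d.insert (pvKey c) (v c))
      PySem.Dict.empty).items
    = (PySem.Set.ofList t).map (fun c => (pvKey c, v c)) := by
  intro t
  induction t using List.reverseRecOn with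
  | nil => simp [PySem.Dict.empty, PySem.Set.ofList]
  | append_singleton t x ih =>
    rw [List.foldl_append, List.foldl_cons, List.foldl_nil, PySem.Set.ofList_append_singleton]
    set d := t.foldl (fun (d : PySem.Dict String (List Int)) c => d.insert (pvKey c) (v c))
      PySem.Dict.empty with hd
    have hkeys : d.keys = ((PySem.Set.ofList t).map (fun c => (pvKey c, v c))).map (·.1) := by
      simp only [PySem.Dict.keys, ih]
    have hkeys' : d.keys = (PySem.Set.ofList t).map pvKey := by
      rw [hkeys, List.map_map]; rfl
    have hcont : d.contains (pvKey x) = decide (x ∈ PySem.Set.ofList t) := by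
      rw [PySem.Dict.contains_eq_decide_mem_keys, hkeys']
      by_cases hx : x ∈ PySem.Set.ofList t
      · simp [hx, List.mem_map_of_mem]
      · simp only [hx, decide_false, decide_eq_false_iff_not]
        intro hm
        rcases List.mem_map.mp hm with ⟨a, ha, hfa⟩
        exact hx (pvKey_inj hfa ▸ ha)
    by_cases hx : x ∈ PySem.Set.ofList t
    · rw [PySem.Dict.items_insert_of_contains _ _ (by simp [hcont, hx]), ih,
        PySem.Set.add_of_mem hx, List.map_map]
      refine List.map_congr_left ?_
      intro a _
      by_cases hax : a = x
      · subst hax; simp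
      · have : ¬ (pvKey a == pvKey x) = true := by
          simp only [beq_iff_eq]
          exact fun hh => hax (pvKey_inj hh)
        simp [Function.comp, this]
    · rw [PySem.Dict.items_insert_of_not_contains _ _ (by simp [hcont, hx]), ih,
        PySem.Set.add_of_not_mem hx, List.map_append, List.map_singleton]

-- B's table-building fold
lemma pv_foldB : ∀ (s : List Char),
    ((PySem.List.enumerate s 0).foldl
      (fun (t : PySem.Dict String (List Int)) p =>
        t.modify (String.ofList [p.2]) PySem.Set.empty (fun st => PySem.Set.add st p.1))
      PySem.Dict.empty)
    = PySem.Dict.mk ((PySem.Set.ofList (s.map pvKey)).map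
        (fun k => (k, ((PySem.List.enumerate s 0).filter (fun p => pvKey p.2 == k)).map (·.1)))) := by
  intro s
  induction s using List.reverseRecOn with
  | nil => simp [PySem.Dict.empty, PySem.Set.ofList, PySem.List.enumerate]
  | append_singleton t x ih =>
    have henum : PySem.List.enumerate (t ++ [x]) 0
        = PySem.List.enumerate t 0 ++ [((t.length : Int), x)] := by
      rw [PySem.List.enumerate_append, PySem.List.enumerate_cons, PySem.List.enumerate_nil]
      norm_num
    rw [henum, List.foldl_append, List.foldl_cons, List.foldl_nil, ih]
    set K := PySem.Set.ofList (t.map pvKey) with hK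
    set g := fun k => ((PySem.List.enumerate t 0).filter (fun p => pvKey p.2 == k)).map
      (fun p : Int × Char => p.1) with hg
    set k0 := pvKey x with hk0
    set T : PySem.Dict String (List Int) := PySem.Dict.mk (K.map (fun k => (k, g k))) with hT
    have hnodupK : K.Nodup := by rw [hK]; exact PySem.Set.nodup_ofList _
    have hkeysT : T.keys = K := by
      simp [hT, PySem.Dict.keys, List.map_map, Function.comp_def]
    have hmemK : k0 ∈ K ↔ x ∈ t := by
      rw [hK, PySem.Set.mem_ofList]
      constructor
      · intro hm
        rcases List.mem_map.mp hm with ⟨a, ha, hfa⟩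
        exact pvKey_inj hfa ▸ ha
      · exact fun ha => List.mem_map_of_mem ha
    have hcontT : T.contains k0 = decide (x ∈ t) := by
      rw [PySem.Dict.contains_eq_decide_mem_keys, hkeysT]
      by_cases hx : x ∈ t
      · simp [hx, hmemK]
      · simp [hx, hmemK]
    have hglt : ∀ k, ((t.length : Int)) ∉ g k := by
      intro k hm
      rcases List.mem_map.mp hm with ⟨p, hp, hp1⟩
      rcases (PySem.List.mem_enumerate_iff t 0 p).mp (List.mem_of_mem_filter hp) with ⟨j, hj, rfl⟩
      simp at hp1; omega
    have hgsplit : ∀ k, ((PySem.List.enumerate t 0 ++ [((t.length : Int), x)]).filter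
        (fun p => pvKey p.2 == k)).map (fun p : Int × Char => p.1)
        = g k ++ (if (k0 == k) = true then [(t.length : Int)] else []) := by
      intro k
      rw [List.filter_append, List.map_append, hg]
      congr 1
      by_cases hkk : (k0 == k) = true
      · simp only [List.filter_cons, List.filter_nil]
        rw [if_pos (by simpa [hk0] using hkk), if_pos hkk]
        simp
      · simp only [List.filter_cons, List.filter_nil]
        rw [if_neg (by simpa [hk0] using hkk), if_neg hkk]
        simp
    show T.modify (String.ofList [x]) PySem.Set.empty (fun st => PySem.Set.add st (t.length : Int)) = _
    rw [show String.ofList [x] = k0 from rfl]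
    rw [show PySem.Dict.modify T k0 PySem.Set.empty (fun st => PySem.Set.add st (t.length : Int))
      = T.insert k0 (PySem.Set.add (T.getD k0 PySem.Set.empty) (t.length : Int)) from rfl]
    have hK' : PySem.Set.ofList ((t ++ [x]).map pvKey) = K.add k0 := by
      rw [List.map_append, List.map_singleton, PySem.Set.ofList_append_singleton, hK]
    by_cases hx : x ∈ t
    · have hk0K : k0 ∈ K := hmemK.mpr hx
      have hgetD : T.getD k0 PySem.Set.empty = g k0 :=
        PySem.Dict.getD_of_mem_items T (List.mem_map_of_mem hk0K) (hkeysT ▸ hnodupK) _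
      rw [hgetD, PySem.Set.add_of_not_mem (hglt k0)]
      apply PySem.Dict.ext
      rw [PySem.Dict.items_insert_of_contains _ _ (by rw [hcontT]; simp [hx])]
      show List.map _ T.items = List.map _ (PySem.Set.ofList ((t ++ [x]).map pvKey))
      rw [hK', PySem.Set.add_of_mem hk0K, hT]
      show List.map _ (K.map (fun k => (k, g k))) = _
      rw [List.map_map]
      refine List.map_congr_left ?_
      intro k _
      by_cases hkk : k = k0
      · subst hkk
        simp only [Function.comp_apply, beq_self_eq_true, if_true]
        rw [hgsplit k0, if_pos (by simp)]
      · have hne : ¬ (k == k0) = true := by simp [hkk]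
        simp only [Function.comp_apply, hne, Bool.false_eq_true, if_false]
        rw [hgsplit k, if_neg (by simp only [beq_iff_eq]; exact fun hh => hkk hh.symm),
          List.append_nil]
    · have hk0K : k0 ∉ K := fun hm => hx (hmemK.mp hm)
      have hgetD : T.getD k0 PySem.Set.empty = PySem.Set.empty :=
        PySem.Dict.getD_of_not_contains T _ (by rw [hcontT]; simp [hx])
      have hgk0 : g k0 = [] := by
        have hfil : List.filter (fun p => pvKey p.2 == k0) (PySem.List.enumerate t 0) = [] := by
          rw [List.filter_eq_nil_iff]
          intro p hp hpk
          rcases (PySem.List.mem_enumerate_iff t 0 p).mp hp with ⟨j, hj, rfl⟩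
          refine hk0K ?_
          rw [hK, PySem.Set.mem_ofList, ← eq_of_beq hpk]
          exact List.mem_map_of_mem (List.getElem_mem hj)
        simp [hg, hfil]
      rw [hgetD]
      apply PySem.Dict.ext
      rw [PySem.Dict.items_insert_of_not_contains _ _ (by rw [hcontT]; simp [hx])]
      show T.items ++ _ = List.map _ (PySem.Set.ofList ((t ++ [x]).map pvKey))
      rw [hK', PySem.Set.add_of_not_mem hk0K, hT]
      show (K.map (fun k => (k, g k))) ++ _ = _
      rw [List.map_append, List.map_singleton]
      congr 1
      · refine List.map_congr_left ?_
        intro k hk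
        have hne : ¬ (k0 == k) = true := by
          simp only [beq_iff_eq]
          exact fun hh => hk0K (hh ▸ hk)
        rw [hgsplit k, if_neg hne, List.append_nil]
      · rw [hgsplit k0, if_pos (by simp), hgk0]
        simp [PySem.Set.empty, PySem.Set.add]

lemma pv_idxFrom_length (c : Char) : ∀ (t : List Char) (i : Int),
    (pvIdxFrom t c i).length = t.count c := by
  intro t
  induction t with
  | nil => intro i; simp [pvIdxFrom, PySem.List.enumerate]
  | cons h rest ih =>
    intro i
    by_cases hc : h = c
    · simp [pvIdxFrom, PySem.List.enumerate_cons, hc]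
      have := ih (i+1); simp [pvIdxFrom] at this; omega
    · have hbc : ¬ (h == c) = true := by simp [hc]
      simp [pvIdxFrom, PySem.List.enumerate_cons, hbc, hc]
      have := ih (i+1); simp [pvIdxFrom] at this; omega

lemma pv_G_eq (s : List Char) (c : Char) :
    ((PySem.List.enumerate s 0).filter (fun p => pvKey p.2 == pvKey c)).map
      (fun p : Int × Char => p.1) = pvIdxFrom s c 0 := by
  unfold pvIdxFrom
  congr 1
  apply List.filter_congr
  intro p _
  by_cases hp : p.2 = c
  · simp [hp]
  · have h1 : ¬ (pvKey p.2 == pvKey c) = true := by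
      simp only [beq_iff_eq]; exact fun hh => hp (pvKey_inj hh)
    have h2 : ¬ (p.2 == c) = true := by simp [hp]
    simp [h1, h2]

-- ===== VERDICT (by name: the statement is the Claim_ definition above) =====
theorem doubleInString_spec : Claim_equal_doubleInString := by
  intro string _
  show ((string.toList).foldl
      (fun (double : PySem.Dict String (List Int)) char =>
        if PySem.Chars.count string.toList [char] > 1 then
          double.insert (String.ofList [char])
            (pvALoop string.toList char PySem.Set.empty string.toList 0 (string.toList.length + 1))
        else double)
      PySem.Dict.empty).items
    = (PySem.Dict.ofList ((((PySem.List.enumerate string.toList 0).foldl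
        (fun (t : PySem.Dict String (List Int)) p =>
          t.modify (String.ofList [p.2]) PySem.Set.empty (fun st => PySem.Set.add st p.1))
        PySem.Dict.empty)).items.filter (fun p => p.2.length > 1))).items
  set s := string.toList with hs
  set v : Char → List Int := fun c => pvALoop s c PySem.Set.empty s 0 (s.length + 1) with hv
  set pA : Char → Bool := fun c => decide (1 < PySem.Chars.count s [c]) with hpA
  -- A side
  have hA : (s.foldl
      (fun (double : PySem.Dict String (List Int)) char =>
        if PySem.Chars.count s [char] > 1 then
          double.insert (String.ofList [char]) (v char)
        else double)
      PySem.Dict.empty).items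
      = (PySem.Set.ofList (s.filter pA)).map (fun c => (pvKey c, v c)) := by
    rw [← pv_foldA v (s.filter pA), List.foldl_filter]
    have hfun : (fun (double : PySem.Dict String (List Int)) char =>
        if PySem.Chars.count s [char] > 1 then
          double.insert (String.ofList [char]) (v char)
        else double)
        = (fun (x : PySem.Dict String (List Int)) y =>
            if pA y = true then x.insert (pvKey y) (v y) else x) := by
      funext d c
      by_cases h : 1 < PySem.Chars.count s [c]
      · rw [if_pos h, if_pos (by simp [hpA, h])]; rfl
      · rw [if_neg h, if_neg (by simp [hpA, h])]
    rw [hfun]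
  -- B side
  rw [pv_foldB s]
  set G : String → List Int := fun k =>
    ((PySem.List.enumerate s 0).filter (fun p => pvKey p.2 == k)).map
      (fun p : Int × Char => p.1) with hG
  have hitems : (PySem.Dict.mk ((PySem.Set.ofList (s.map pvKey)).map (fun k => (k, G k)))).items
      = (PySem.Set.ofList (s.map pvKey)).map (fun k => (k, G k)) := rfl
  rw [hA]
  rw [hitems]
  set K := PySem.Set.ofList (s.map pvKey) with hK
  set qG : String → Bool := fun k => decide ((G k).length > 1) with hqG
  have hfilter : (K.map (fun k => (k, G k))).filter (fun p => p.2.length > 1)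
      = (K.filter qG).map (fun k => (k, G k)) := by
    rw [List.filter_map]
    congr 1
  have hfresh : (PySem.Dict.ofList ((K.filter qG).map (fun k => (k, G k)))).items
      = (K.filter qG).map (fun k => (k, G k)) := by
    show (((K.filter qG).map (fun k => (k, G k))).foldl
      (fun (d : PySem.Dict String (List Int)) p => d.insert p.1 p.2) PySem.Dict.empty).items = _
    rw [PySem.Dict.items_foldl_insert_fresh _ Prod.fst Prod.snd _
      (by intro a _; rfl)
      (by rw [List.map_map]
          have : (Prod.fst ∘ fun k => (k, G k)) = id := rfl
          rw [this, List.map_id]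
          exact (PySem.Set.nodup_ofList _).filter _)]
    simp [PySem.Dict.empty, Function.comp_def]
  rw [hfilter, hfresh]
  -- bridge
  have hKD : K = (PySem.Set.ofList s).map pvKey := by
    rw [hK, pv_ofList_map pvKey (fun _ _ => pvKey_inj)]
  have hq_pA : ∀ c, qG (pvKey c) = pA c := by
    intro c
    have hlen : (G (pvKey c)).length = s.count c := by
      simp only [hG]; rw [pv_G_eq s c, pv_idxFrom_length]
    simp [hqG, hpA, hlen, pv_count_single, gt_iff_lt]
  rw [hKD, List.filter_map]
  have hfc : (PySem.Set.ofList s).filter (qG ∘ pvKey) = (PySem.Set.ofList s).filter pA := by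
    apply List.filter_congr
    intro c _
    exact hq_pA c
  rw [hfc, ← pv_ofList_filter, List.map_map]
  refine List.map_congr_left ?_
  intro c hc
  have hcnt : 1 < s.count c := by
    have := (PySem.Set.mem_ofList _ _).mp hc
    rcases List.mem_filter.mp this with ⟨_, hpc⟩
    rw [hpA] at hpc
    rw [← pv_count_single]
    exact of_decide_eq_true hpc
  have hvc : v c = pvIdxFrom s c 0 := by rw [hv]; exact pvALoop_top s c hcnt
  simp only [Function.comp_apply, hG]
  rw [pv_G_eq s c, hvc]
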